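-- pv_equiv track=rewrite | github.com/pvginkel/ElectronicsInventory | app/api/parts.py | _parse_include_parameter
-- ===== SOURCE A (Python) =====
-- class IncludeParameterError(Exception):
--     """Exception raised for invalid include parameter values."""
--     def __init__(self, message: str):
--         self.message = message
--         super().__init__(message)
--
-- def _parse_include_parameter(include_param: str | None) -> tuple[bool, bool, bool, bool]:
--     """Parse and validate the include query parameter.
--
--     Args:
--         include_param: Comma-separated string of include flags
--
--     Returns:
--         Tuple of (include_locations, include_kits, include_shopping_lists, include_cover)
--
--     Raises:
--         IncludeParameterError: If include parameter is invalid or too long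
--     """
--     if not include_param:
--         return (False, False, False, False)
--
--     # DoS protection: reject if parameter is too long
--     if len(include_param) > 200:
--         raise IncludeParameterError("include parameter exceeds maximum length of 200 characters")
--
--     # Split and validate tokens
--     tokens = [token.strip() for token in include_param.split(",")]
--
--     # DoS protection: reject if too many tokens
--     if len(tokens) > 10:
--         raise IncludeParameterError("include parameter exceeds maximum of 10 tokens")
--
--     # Validate against allowed values
--     allowed_values = {"locations", "kits", "shopping_lists", "cover"}
--     for token in tokens:
--         if token and token not in allowed_values:
--             raise IncludeParameterError(f"invalid include value '{token}'. Allowed values: {', '.join(sorted(allowed_values))}")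
--
--     # Return flags
--     include_locations = "locations" in tokens
--     include_kits = "kits" in tokens
--     include_shopping_lists = "shopping_lists" in tokens
--     include_cover = "cover" in tokens
--
--     return (include_locations, include_kits, include_shopping_lists, include_cover)
-- ===== SOURCE B (Python) =====
-- class IncludeParameterError(Exception):
--     """Exception raised for invalid include parameter values."""
--     def __init__(self, message: str):
--         self.message = message
--         super().__init__(message)
--
-- _BITS = {"locations": 1, "kits": 2, "shopping_lists": 4, "cover": 8}
--
-- def _mask(tokens):
--     """Recursively OR together the bit of each non-empty token (raises on an unknown one)."""
--     if not tokens: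
--         return 0
--     head, rest = tokens[0], tokens[1:]
--     if not head:
--         return _mask(rest)
--     bit = _BITS.get(head)
--     if bit is None:
--         raise IncludeParameterError(
--             f"invalid include value '{head}'. Allowed values: {', '.join(sorted(_BITS))}")
--     return bit | _mask(rest)
--
-- def _parse_include_parameter(include_param):
--     if not include_param:
--         return (False, False, False, False)
--
--     if len(include_param) > 200:
--         raise IncludeParameterError("include parameter exceeds maximum length of 200 characters")
--
--     tokens = [token.strip() for token in include_param.split(",")]
--
--     if len(tokens) > 10:
--         raise IncludeParameterError("include parameter exceeds maximum of 10 tokens")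
--
--     m = _mask(tokens)
--     return (m & 1 != 0, m & 2 != 0, m & 4 != 0, m & 8 != 0)
-- ===== Notes on version B (the rewrite author's own statement) =====
-- stated objective: alternative
-- what changed: A validates tokens in a loop and then runs four separate list-membership scans over the token list; B recursively folds the tokens into a single integer bitmask (each allowed name mapped to a power of two, OR-ed together) and decodes the four flags with bit tests, so no membership scan and no flag container exists.
import Mathlib
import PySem

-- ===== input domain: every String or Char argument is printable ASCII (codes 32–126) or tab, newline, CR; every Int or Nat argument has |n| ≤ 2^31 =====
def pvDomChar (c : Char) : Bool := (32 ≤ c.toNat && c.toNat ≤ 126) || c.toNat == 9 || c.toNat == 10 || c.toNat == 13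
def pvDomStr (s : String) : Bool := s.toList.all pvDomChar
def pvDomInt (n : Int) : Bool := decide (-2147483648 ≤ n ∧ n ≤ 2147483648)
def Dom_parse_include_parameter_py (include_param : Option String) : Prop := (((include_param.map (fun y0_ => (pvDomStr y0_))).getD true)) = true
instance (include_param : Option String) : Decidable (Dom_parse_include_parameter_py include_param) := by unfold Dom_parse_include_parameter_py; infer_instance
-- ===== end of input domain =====

-- B replaces A's validation loop plus four 'x in tokens' scans by a recursive fold of the tokens
-- into one integer bitmask, decoded with bit tests; equivalence is about the RETURN value on
-- inputs where A returns normally (raising inputs are excluded by Pre_).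

-- ===== PORT A =====
def pvAllowed : PySem.Set String := PySem.Set.ofList ["locations", "kits", "shopping_lists", "cover"]

def parse_include_parameter_py (include_param : Option String) : Bool × Bool × Bool × Bool :=
  match include_param with
  | none => (false, false, false, false)
  | some s =>
    if s == "" then (false, false, false, false)
    else if 200 < PySem.Str.len s then (false, false, false, false)  -- raise IncludeParameterError (excluded by Pre_)
    else
      let tokens := ((PySem.Str.split? s ",").getD []).map PySem.Str.strip
      if 10 < (tokens.length : Int) then (false, false, false, false)  -- raise IncludeParameterError (excluded by Pre_)
      else if tokens.any (fun t => !(t == "") && !(PySem.Set.contains pvAllowed t)) then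
        (false, false, false, false)  -- raise IncludeParameterError (excluded by Pre_)
      else
        (tokens.contains "locations", tokens.contains "kits",
         tokens.contains "shopping_lists", tokens.contains "cover")

-- ===== PORT B =====
-- _BITS.get(head): the bit of an allowed name, none otherwise
def pvBit (t : String) : Option Int :=
  if t == "locations" then some 1
  else if t == "kits" then some 2
  else if t == "shopping_lists" then some 4
  else if t == "cover" then some 8
  else none

-- recursive _mask; none = the recursion raised IncludeParameterError
def pvMask : List String → Option Int
  | [] => some 0
  | t :: rest =>
    if t == "" then pvMask rest
    else
      match pvBit t with
      | none => none  -- raise IncludeParameterError (excluded by Pre_)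
      | some b => (pvMask rest).map (fun m => Int.lor b m)

def parse_include_parameter_py_alt (include_param : Option String) : Bool × Bool × Bool × Bool :=
  match include_param with
  | none => (false, false, false, false)
  | some s =>
    if s == "" then (false, false, false, false)
    else if 200 < PySem.Str.len s then (false, false, false, false)  -- raise (excluded by Pre_)
    else
      let tokens := ((PySem.Str.split? s ",").getD []).map PySem.Str.strip
      if 10 < (tokens.length : Int) then (false, false, false, false)  -- raise (excluded by Pre_)
      else
        match pvMask tokens with
        | none => (false, false, false, false)  -- raise (excluded by Pre_)
        | some m => (!(Int.land m 1 == 0), !(Int.land m 2 == 0), !(Int.land m 4 == 0), !(Int.land m 8 == 0))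

-- ===== PRECONDITION & SPEC =====
-- Pre_ excludes exactly the inputs on which A raises IncludeParameterError:
-- length > 200, more than 10 comma tokens, or a non-empty stripped token outside the four allowed names.
def pvPreStr (s : String) : Bool :=
  (s == "") ||
  ((PySem.Str.len s ≤ 200) &&
   (((PySem.Str.split? s ",").getD []).length ≤ 10) &&
   (((PySem.Str.split? s ",").getD []).map PySem.Str.strip).all
     (fun t => (t == "") || (["locations", "kits", "shopping_lists", "cover"] : List String).contains t))

def Pre_parse_include_parameter_py (include_param : Option String) : Prop :=
  (include_param.map pvPreStr).getD true = true
instance (include_param : Option String) : Decidable (Pre_parse_include_parameter_py include_param) := by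
  unfold Pre_parse_include_parameter_py; infer_instance

def pvWitness_parse_include_parameter_py : Option String := some "kits, locations"

def Spec_parse_include_parameter_py (include_param : Option String) (out : Bool × Bool × Bool × Bool) : Prop := out = parse_include_parameter_py_alt include_param
instance (include_param : Option String) (out : Bool × Bool × Bool × Bool) : Decidable (Spec_parse_include_parameter_py include_param out) := by unfold Spec_parse_include_parameter_py; infer_instance

-- ===== CLAIM (what is proved, stated in full; the proofs are below) =====
def Claim_equal_parse_include_parameter_py : Prop := ∀ (include_param : Option String), Dom_parse_include_parameter_py include_param → Pre_parse_include_parameter_py include_param → Spec_parse_include_parameter_py include_param (parse_include_parameter_py include_param)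

-- ===== LEMMAS AND PROOFS =====

-- the mask whose bits record the four flags
def pvMk (b1 b2 b3 b4 : Bool) : Int :=
  (if b1 then 1 else 0) + (if b2 then 2 else 0) + (if b3 then 4 else 0) + (if b4 then 8 else 0)

lemma pvLor1 : ∀ (b1 b2 b3 b4 : Bool), Int.lor 1 (pvMk b1 b2 b3 b4) = pvMk true b2 b3 b4 := by decide
lemma pvLor2 : ∀ (b1 b2 b3 b4 : Bool), Int.lor 2 (pvMk b1 b2 b3 b4) = pvMk b1 true b3 b4 := by decide
lemma pvLor4 : ∀ (b1 b2 b3 b4 : Bool), Int.lor 4 (pvMk b1 b2 b3 b4) = pvMk b1 b2 true b4 := by decide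
lemma pvLor8 : ∀ (b1 b2 b3 b4 : Bool), Int.lor 8 (pvMk b1 b2 b3 b4) = pvMk b1 b2 b3 true := by decide

-- B's recursion on tokens that are all empty-or-allowed computes exactly the membership mask
lemma pvMask_good (tokens : List String)
    (h : ∀ t ∈ tokens, t = "" ∨ t ∈ (["locations", "kits", "shopping_lists", "cover"] : List String)) :
    pvMask tokens = some (pvMk (tokens.contains "locations") (tokens.contains "kits")
                               (tokens.contains "shopping_lists") (tokens.contains "cover")) := by
  induction tokens with
  | nil => rfl
  | cons t rest ih =>
    have ht := h t (List.mem_cons_self ..)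
    have hrest : ∀ t ∈ rest, t = "" ∨ t ∈ (["locations", "kits", "shopping_lists", "cover"] : List String) :=
      fun t' ht' => h t' (List.mem_cons_of_mem _ ht')
    simp only [List.mem_cons, List.not_mem_nil, or_false] at ht
    rcases ht with rfl | rfl | rfl | rfl | rfl <;>
      simp [pvMask, pvBit, ih hrest, pvLor1, pvLor2, pvLor4, pvLor8]

lemma pvDecode : ∀ (b1 b2 b3 b4 : Bool),
    (!(Int.land (pvMk b1 b2 b3 b4) 1 == 0), !(Int.land (pvMk b1 b2 b3 b4) 2 == 0),
     !(Int.land (pvMk b1 b2 b3 b4) 4 == 0), !(Int.land (pvMk b1 b2 b3 b4) 8 == 0)) = (b1, b2, b3, b4) := by decide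

-- ===== VERDICT (by name: the statement is the Claim_ definition above) =====
theorem parse_include_parameter_py_spec : Claim_equal_parse_include_parameter_py := by
  intro ip _hdom hpre
  unfold Spec_parse_include_parameter_py
  cases ip with
  | none => rfl
  | some s =>
    unfold Pre_parse_include_parameter_py pvPreStr at hpre
    simp only [Option.map_some, Option.getD_some, Bool.or_eq_true, Bool.and_eq_true,
      List.all_eq_true, beq_iff_eq, decide_eq_true_eq] at hpre
    unfold parse_include_parameter_py parse_include_parameter_py_alt
    by_cases hs : s = ""
    · simp [hs]
    · rcases hpre with hpre | ⟨⟨hlen, hcnt⟩, htok⟩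
      · exact absurd hpre hs
      simp only [beq_iff_eq, hs, if_false]
      have hlen' : ¬ (200 < PySem.Str.len s) := by omega
      have hcnt' : ¬ (10 < ((((PySem.Str.split? s ",").getD []).map PySem.Str.strip).length : Int)) := by
        simp only [List.length_map]; omega
      simp only [hlen', if_false, hcnt', if_false]
      have htok' : ∀ t ∈ ((PySem.Str.split? s ",").getD []).map PySem.Str.strip,
          t = "" ∨ t ∈ (["locations", "kits", "shopping_lists", "cover"] : List String) := by
        intro t ht
        rcases htok t ht with h | h
        · exact Or.inl h
        · exact Or.inr (by simpa using h)
      have hany : (((PySem.Str.split? s ",").getD []).map PySem.Str.strip).any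
          (fun t => !(t == "") && !(PySem.Set.contains pvAllowed t)) = false := by
        simp only [List.any_eq_false]
        intro t ht
        rcases htok' t ht with rfl | h
        · decide
        · fin_cases h <;> decide
      rw [hany, pvMask_good _ htok']
      exact (pvDecode _ _ _ _).symm
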